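-- pv_equiv track=rewrite | github.com/buaa-hipo/SWStenDSL | tool/scalability_graph.py | get_idea_flops
-- ===== SOURCE A (Python) =====
-- def get_idea_flops(flops, num_mpi):
--     base=[]
--     for row in flops:
--         base.append(row[0])
--     res=[]
--     for ele in base:
--         list1=[]
--         for i in range(num_mpi):
--             list1.append(ele)
--             ele=ele*2
--         res.append(list1)
--     return res
-- ===== SOURCE B (Python) =====
-- def get_idea_flops(flops, num_mpi):
--     # Column-wise: build the first column once, then generate each successive
--     # column by doubling the previous whole column, and transpose at the end.
--     cols = []
--     col = [row[0] for row in flops]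
--     for _ in range(num_mpi):
--         cols.append(col)
--         col = [2 * x for x in col]
--     if num_mpi <= 0:
--         return [[] for _ in flops]
--     return [list(t) for t in zip(*cols)]
-- ===== Notes on version B (the rewrite author's own statement) =====
-- stated objective: alternative
-- what changed: A fills the table row by row, repeatedly doubling a per-row mutable accumulator; B builds the table in the transposed orientation - it constructs the columns (each column is the previous column doubled elementwise) and transposes with zip(*cols) at the end.
import Mathlib
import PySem

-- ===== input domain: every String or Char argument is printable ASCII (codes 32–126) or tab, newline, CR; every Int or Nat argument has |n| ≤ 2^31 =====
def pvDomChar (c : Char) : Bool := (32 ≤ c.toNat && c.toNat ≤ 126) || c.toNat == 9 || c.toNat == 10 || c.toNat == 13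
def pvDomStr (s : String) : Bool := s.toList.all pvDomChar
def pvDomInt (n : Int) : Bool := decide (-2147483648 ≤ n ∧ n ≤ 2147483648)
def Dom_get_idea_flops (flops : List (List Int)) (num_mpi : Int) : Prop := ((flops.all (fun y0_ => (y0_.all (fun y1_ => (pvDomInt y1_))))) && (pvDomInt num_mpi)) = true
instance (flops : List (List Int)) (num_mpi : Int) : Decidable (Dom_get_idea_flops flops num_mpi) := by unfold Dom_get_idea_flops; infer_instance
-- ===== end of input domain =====

-- B builds the table column-by-column (each column = previous column doubled) and transposes, instead of A's row-by-row doubling accumulator; same cost, different traversal.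
-- ===== PORT A =====
def get_idea_flops (flops : List (List Int)) (num_mpi : Int) : List (List Int) :=
  -- base=[]; for row in flops: base.append(row[0])
  let base : List Int := flops.foldl (fun acc row => acc ++ [(PySem.List.pyGet? row 0).getD 0]) []
  -- res=[]; for ele in base: list1=[]; for i in range(num_mpi): list1.append(ele); ele=ele*2; res.append(list1)
  base.foldl (fun res ele0 =>
    let p := (PySem.List.pyRange 0 num_mpi 1).foldl
      (fun (st : List Int × Int) _i => (st.1 ++ [st.2], st.2 * 2)) ([], ele0)
    res ++ [p.1]) []

-- ===== PORT B =====
-- Python's zip(*cols): take i-th elements while every list still has one; the fuel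
-- (length of the first list) bounds the minimum length, so this is exact.
def pyZipStarGo : List (List Int) → Nat → List (List Int)
  | _, 0 => []
  | cols, n+1 =>
      if cols.any (fun l => l.isEmpty) then []
      else cols.map (fun l => l.headD 0) :: pyZipStarGo (cols.map (fun l => l.tail)) n

def pyZipStar (cols : List (List Int)) : List (List Int) :=
  match cols with
  | [] => []
  | c :: cs => pyZipStarGo (c :: cs) c.length

def get_idea_flops_alt (flops : List (List Int)) (num_mpi : Int) : List (List Int) :=
  -- cols = []; col = [row[0] for row in flops]; for _ in range(num_mpi): cols.append(col); col = [2*x for x in col]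
  let col0 : List Int := flops.map (fun row => (PySem.List.pyGet? row 0).getD 0)
  let cols : List (List Int) :=
    ((PySem.List.pyRange 0 num_mpi 1).foldl
      (fun (st : List (List Int) × List Int) _ => (st.1 ++ [st.2], st.2.map (fun x => 2 * x)))
      ([], col0)).1
  if num_mpi ≤ 0 then flops.map (fun _ => []) else pyZipStar cols

-- ===== PRECONDITION & SPEC =====
-- Pre_ excludes inputs containing an empty row, where Python's row[0] raises IndexError.
def Pre_get_idea_flops (flops : List (List Int)) (num_mpi : Int) : Prop := ∀ row ∈ flops, row ≠ []
instance (flops : List (List Int)) (num_mpi : Int) : Decidable (Pre_get_idea_flops flops num_mpi) := by unfold Pre_get_idea_flops; infer_instance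
def pvWitness_get_idea_flops : List (List Int) × Int := ([[3], [5, 7]], 4)

def Spec_get_idea_flops (flops : List (List Int)) (num_mpi : Int) (out : List (List Int)) : Prop := out = get_idea_flops_alt flops num_mpi
instance (flops : List (List Int)) (num_mpi : Int) (out : List (List Int)) : Decidable (Spec_get_idea_flops flops num_mpi out) := by unfold Spec_get_idea_flops; infer_instance

-- ===== CLAIM (what is proved, stated in full; the proofs are below) =====
def Claim_equal_get_idea_flops : Prop := ∀ (flops : List (List Int)) (num_mpi : Int), Dom_get_idea_flops flops num_mpi → Pre_get_idea_flops flops num_mpi → Spec_get_idea_flops flops num_mpi (get_idea_flops flops num_mpi)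

-- ===== LEMMAS AND PROOFS =====

theorem foldl_app_map {α β : Type} (f : β → α) :
    ∀ (l : List β) (acc : List α),
      l.foldl (fun res e => res ++ [f e]) acc = acc ++ l.map f := by
  intro l
  induction l with
  | nil => simp
  | cons x xs ih => intro acc; simp [ih]

-- A's inner doubling loop in closed form
theorem inner_loop_eq (e : Int) (n : Int) :
    (PySem.List.pyRange 0 n 1).foldl
      (fun (st : List Int × Int) _i => (st.1 ++ [st.2], st.2 * 2)) ([], e)
    = ((PySem.List.pyRange 0 n 1).map (fun i => e * 2 ^ i.toNat), e * 2 ^ n.toNat) := by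
  by_cases h : n ≤ 0
  · rw [PySem.List.pyRange_one_eq_nil (by omega)]
    simp [Int.toNat_of_nonpos h]
  · obtain ⟨m, rfl⟩ : ∃ m : Nat, n = (m : Int) := ⟨n.toNat, by omega⟩
    induction m with
    | zero => simp [PySem.List.pyRange_one_eq_nil (le_refl (0:Int))]
    | succ k ih =>
      rcases Nat.eq_zero_or_pos k with hk | hk
      · subst hk
        rw [show ((1:Nat):Int) = 0 + 1 by omega, PySem.List.pyRange_one_succ_right (by omega)]
        simp [PySem.List.pyRange_one_eq_nil (le_refl (0:Int))]
      · have hk' : ¬ ((k:Int) ≤ 0) := by omega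
        rw [show ((k+1:Nat):Int) = (k:Int) + 1 by push_cast; ring,
            PySem.List.pyRange_one_succ_right (by omega)]
        rw [List.foldl_append, List.map_append, ih hk']
        simp [pow_succ]
        ring

theorem a_eq_map (flops : List (List Int)) (n : Int) :
    get_idea_flops flops n
      = flops.map (fun row =>
          (PySem.List.pyRange 0 n 1).map
            (fun i => ((PySem.List.pyGet? row 0).getD 0 : Int) * 2 ^ i.toNat)) := by
  unfold get_idea_flops
  rw [foldl_app_map, List.nil_append, foldl_app_map, List.nil_append, List.map_map]
  refine List.map_congr_left fun row _ => ?_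
  simp only [Function.comp, inner_loop_eq]

-- B's column loop in closed form
theorem cols_loop_eq (c : List Int) (n : Int) :
    ((PySem.List.pyRange 0 n 1).foldl
      (fun (st : List (List Int) × List Int) _ => (st.1 ++ [st.2], st.2.map (fun x => 2 * x)))
      ([], c))
    = ((PySem.List.pyRange 0 n 1).map (fun i => c.map (fun e => 2 ^ i.toNat * e)),
        c.map (fun e => 2 ^ n.toNat * e)) := by
  by_cases h : n ≤ 0
  · rw [PySem.List.pyRange_one_eq_nil (by omega)]
    simp [Int.toNat_of_nonpos h]
  · obtain ⟨m, rfl⟩ : ∃ m : Nat, n = (m : Int) := ⟨n.toNat, by omega⟩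
    induction m with
    | zero => simp [PySem.List.pyRange_one_eq_nil (le_refl (0:Int))]
    | succ k ih =>
      rcases Nat.eq_zero_or_pos k with hk | hk
      · subst hk
        rw [show ((1:Nat):Int) = 0 + 1 by omega, PySem.List.pyRange_one_succ_right (by omega)]
        simp [PySem.List.pyRange_one_eq_nil (le_refl (0:Int))]
      · have hk' : ¬ ((k:Int) ≤ 0) := by omega
        rw [show ((k+1:Nat):Int) = (k:Int) + 1 by push_cast; ring,
            PySem.List.pyRange_one_succ_right (by omega)]
        rw [List.foldl_append, List.map_append, ih hk']
        simp only [List.foldl_cons, List.foldl_nil, List.map_cons, List.map_nil,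
          List.map_map, Prod.mk.injEq]
        refine ⟨trivial, ?_⟩
        refine List.map_congr_left fun e _ => ?_
        have h1 : ((k:Int)).toNat = k := by omega
        have h2 : ((k:Int)+1).toNat = k+1 := by omega
        rw [h1, h2, pow_succ]
        simp only [Function.comp_apply]
        ring

-- transposing a grid given as columns L.map (fun i => base.map (f i)) yields rows
theorem pyZipStarGo_grid {ι : Type} (f : ι → Int → Int) (L : List ι) :
    ∀ (base : List Int),
      pyZipStarGo (L.map (fun i => base.map (f i))) base.length
        = base.map (fun e => L.map (fun i => f i e)) := by
  intro base
  induction base generalizing L with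
  | nil => simp [pyZipStarGo]
  | cons e rest ih =>
    have hne : (L.map (fun i => (e :: rest).map (f i))).any (fun l => l.isEmpty) = false := by
      simp [List.any_map, Function.comp]
    simp only [List.length_cons, pyZipStarGo, hne, if_neg Bool.false_ne_true]
    have h1 : (L.map (fun i => (e :: rest).map (f i))).map (fun l => l.headD 0)
        = L.map (fun i => f i e) := by
      simp [List.map_map, Function.comp]
    have h2 : (L.map (fun i => (e :: rest).map (f i))).map (fun l => l.tail)
        = L.map (fun i => rest.map (f i)) := by
      simp [List.map_map, Function.comp]
    rw [h1, h2, ih]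
    simp

-- ===== VERDICT (by name: the statement is the Claim_ definition above) =====
theorem get_idea_flops_spec : Claim_equal_get_idea_flops := by
  intro flops num_mpi _ _
  unfold Spec_get_idea_flops
  rw [a_eq_map]
  unfold get_idea_flops_alt
  simp only [cols_loop_eq]
  by_cases h : num_mpi ≤ 0
  · rw [if_pos h, PySem.List.pyRange_one_eq_nil (by omega)]
    simp
  · rw [if_neg h]
    have hcons : PySem.List.pyRange 0 num_mpi 1 = 0 :: PySem.List.pyRange 1 num_mpi 1 :=
      PySem.List.pyRange_one_cons (by omega)
    set L := PySem.List.pyRange 0 num_mpi 1 with hL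
    set base := flops.map (fun row => (PySem.List.pyGet? row 0).getD 0) with hbase
    have hgrid : L.map (fun i => base.map (fun e => 2 ^ i.toNat * e)) ≠ [] ∧
        pyZipStar (L.map (fun i => base.map (fun e => 2 ^ i.toNat * e)))
          = base.map (fun e => L.map (fun i => 2 ^ i.toNat * e)) := by
      constructor
      · rw [hcons]; simp
      · rw [hcons]
        show pyZipStarGo _ (base.map (fun e => 2 ^ ((0:Int)).toNat * e)).length
              = _
        rw [List.length_map]
        have := pyZipStarGo_grid (fun (i : Int) (e : Int) => 2 ^ i.toNat * e)
          (0 :: PySem.List.pyRange 1 num_mpi 1) base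
        simpa using this
    rw [hgrid.2, hbase, List.map_map]
    refine List.map_congr_left fun row _ => ?_
    refine List.map_congr_left fun i _ => ?_
    dsimp
    ring
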